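-- pv_equiv track=rewrite | github.com/cha2hyun/TIL | Etc/filtering/main_seungwook.py | is_filtering_list_in_text
-- ===== SOURCE A (Python) =====
-- def is_filtering_list_in_text(cleaned_text, filtering_list):
--     result = []
--     for filtered in filtering_list:
--         search_text = cleaned_text
--         accumulate_idx = 0
--         count = 0
--         filtered_len = len(filtered)
--         while search_text:
--             find_idx = search_text.find(filtered)
--             if find_idx != -1:
--                 if count == 0:
--                     accumulate_idx += find_idx
--                 else:
--                     accumulate_idx += find_idx + 1
--                 result += range(accumulate_idx, accumulate_idx+filtered_len)
--                 search_text = search_text[find_idx+1:] # 계속 앞 부분 잘라주면서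
--                 count += 1
--             else:
--                 break
--     result = list(set(result)) # 중복제거
--     result.sort(reverse=True) # 순서 재정렬
--     return result
-- ===== SOURCE B (Python) =====
-- def is_filtering_list_in_text(cleaned_text, filtering_list):
--     covered = set()
--     n = len(cleaned_text)
--     for i in range(n):
--         for word in filtering_list:
--             if cleaned_text[i:i+len(word)] == word:
--                 covered.update(range(i, i+len(word)))
--     return sorted(covered, reverse=True)
-- ===== Notes on version B (the rewrite author's own statement) =====
-- stated objective: alternative
-- what changed: B replaces A's per-word while-loop of repeated str.find calls with progressive suffix slicing and accumulated-index bookkeeping by a single scan over text positions that slice-compares each word at each position and collects covered indices into a set, then sorts descending.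
import Mathlib
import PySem

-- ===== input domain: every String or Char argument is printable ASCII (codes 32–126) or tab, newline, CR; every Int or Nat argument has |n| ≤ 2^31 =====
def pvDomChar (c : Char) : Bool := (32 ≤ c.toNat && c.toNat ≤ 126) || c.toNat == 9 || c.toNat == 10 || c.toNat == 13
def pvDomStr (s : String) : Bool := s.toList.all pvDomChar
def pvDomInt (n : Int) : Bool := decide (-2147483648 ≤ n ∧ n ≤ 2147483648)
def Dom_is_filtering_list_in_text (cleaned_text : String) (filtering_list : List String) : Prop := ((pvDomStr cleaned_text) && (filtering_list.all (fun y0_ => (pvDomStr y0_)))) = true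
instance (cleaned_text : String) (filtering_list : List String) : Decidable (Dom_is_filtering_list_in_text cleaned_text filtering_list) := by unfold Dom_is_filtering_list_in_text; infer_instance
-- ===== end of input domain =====

-- B replaces A's per-word repeated str.find loop by a single scan over text positions
-- with slice comparison, collecting covered indices in a set (objective: alternative decomposition).

-- ===== PORT A =====
-- inner while-loop of A for one word `filtered`, state (search_text, accumulate_idx, count, result)
def pvLoopA (filtered : List Char) (search_text : List Char) (accumulate_idx : Int)
    (count : Int) (result : List Int) : List Int :=
  if _h : search_text = [] then result
  else
    let find_idx := PySem.Chars.find search_text filtered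
    if _hf : find_idx ≠ -1 then
      let acc' := if count = 0 then accumulate_idx + find_idx else accumulate_idx + find_idx + 1
      pvLoopA filtered (PySem.List.slice search_text (some (find_idx + 1)) none)
        acc' (count + 1) (result ++ PySem.List.pyRange acc' (acc' + filtered.length) 1)
    else result
termination_by search_text.length
decreasing_by
  have h0 : (0:Int) ≤ PySem.Chars.find search_text filtered := by
    have := PySem.Chars.neg_one_le_find search_text filtered
    omega
  rw [PySem.List.slice_from _ (by omega : (0:Int) ≤ PySem.Chars.find search_text filtered + 1)]
  simp only [List.length_drop]
  have hlen : 0 < search_text.length := List.length_pos_iff.mpr _h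
  omega

def is_filtering_list_in_text (cleaned_text : String) (filtering_list : List String) : List Int :=
  let result : List Int :=
    filtering_list.foldl (fun result filtered => pvLoopA filtered.toList cleaned_text.toList 0 0 result) []
  PySem.List.sorted (PySem.Set.ofList result) id true

-- ===== PORT B =====
def is_filtering_list_in_text_alt (cleaned_text : String) (filtering_list : List String) : List Int :=
  let s := cleaned_text.toList
  let covered : PySem.Set Int :=
    (PySem.List.pyRange 0 s.length 1).foldl (fun covered i =>
      filtering_list.foldl (fun covered word =>
        let w := word.toList
        if PySem.List.slice s (some i) (some (i + w.length)) = w then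
          PySem.Set.update covered (PySem.List.pyRange i (i + w.length) 1)
        else covered) covered) (PySem.Set.ofList [])
  PySem.List.sorted covered id true

-- ===== PRECONDITION & SPEC =====
def Spec_is_filtering_list_in_text (cleaned_text : String) (filtering_list : List String) (out : List Int) : Prop := out = is_filtering_list_in_text_alt cleaned_text filtering_list
instance (cleaned_text : String) (filtering_list : List String) (out : List Int) : Decidable (Spec_is_filtering_list_in_text cleaned_text filtering_list out) := by unfold Spec_is_filtering_list_in_text; infer_instance

-- ===== CLAIM (what is proved, stated in full; the proofs are below) =====
def Claim_equal_is_filtering_list_in_text : Prop := ∀ (cleaned_text : String) (filtering_list : List String), Dom_is_filtering_list_in_text cleaned_text filtering_list → Spec_is_filtering_list_in_text cleaned_text filtering_list (is_filtering_list_in_text cleaned_text filtering_list)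

-- ===== LEMMAS AND PROOFS =====

-- index j is covered by some occurrence of some word of fl in s
def pvCovers (s : List Char) (fl : List String) (j : Int) : Prop :=
  ∃ w ∈ fl, ∃ p : Nat, w.toList <+: s.drop p ∧ (p : Int) ≤ j ∧ j < (p : Int) + w.toList.length

lemma pvLoopA_mem (w : List Char) :
    ∀ (s : List Char) (acc count : Int) (result : List Int) (j : Int), 0 ≤ count →
    (j ∈ pvLoopA w s acc count result ↔
      j ∈ result ∨ ∃ p : Nat, w <+: s.drop p ∧
        (if count = 0 then acc else acc + 1) + p ≤ j ∧
        j < (if count = 0 then acc else acc + 1) + p + w.length) := by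
  intro s acc count result j hc
  fun_induction pvLoopA w s acc count result with
  | case1 a b c =>
    simp only [List.drop_nil]
    constructor
    · exact Or.inl
    · rintro (h | ⟨p, hp, h1, h2⟩)
      · exact h
      · have hw : w = [] := List.prefix_nil.mp hp
        subst hw
        simp only [List.length_nil, Nat.cast_zero, add_zero] at h2
        omega
  | case2 a b c d e f g =>
    rename_i acc' ih
    have hfeq : f = PySem.Chars.find a w := rfl
    have h0 : (0:Int) ≤ f := by
      have := PySem.Chars.neg_one_le_find a w
      rw [hfeq] at g ⊢; omega
    have hacc : acc' = (if c = 0 then b else b + 1) + f := by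
      show (if h : c = 0 then b + f else b + f + 1) = (if c = 0 then b else b + 1) + f
      split_ifs <;> ring
    have hF : ((f.toNat : Int)) = f := Int.toNat_of_nonneg h0
    have hsp := PySem.Chars.find_spec (s := a) (sub := w) (hfeq ▸ h0)
    have hslice : PySem.List.slice a (some (f + 1)) = List.drop (f.toNat + 1) a := by
      rw [PySem.List.slice_from a (by omega : (0:Int) ≤ f + 1)]
      congr 1
      omega
    specialize ih (by omega)
    rw [if_neg (by omega : ¬ (c + 1 = 0))] at ih
    rw [hslice, hacc] at ih ⊢
    rw [ih]
    simp only [List.mem_append, PySem.List.mem_pyRange_one, List.drop_drop]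
    set B := (if c = 0 then b else b + 1) with hB
    have hpre1 : w <+: List.drop f.toNat a := by
      have := hsp.1
      rw [← hfeq] at this
      exact this
    constructor
    · rintro ((h | h) | ⟨p, hp, h1, h2⟩)
      · exact Or.inl h
      · exact Or.inr ⟨f.toNat, hpre1, by omega, by omega⟩
      · refine Or.inr ⟨f.toNat + 1 + p, hp, by omega, by omega⟩
    · rintro (h | ⟨p, hp, h1, h2⟩)
      · exact Or.inl (Or.inl h)
      · rcases lt_trichotomy p f.toNat with hpf | rfl | hpf
        · have := hsp.2 p (by rw [← hfeq]; omega)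
          exact absurd hp this
        · exact Or.inl (Or.inr ⟨by omega, by omega⟩)
        · refine Or.inr ⟨p - (f.toNat + 1), ?_, by omega, by omega⟩
          rw [show f.toNat + 1 + (p - (f.toNat + 1)) = p from by omega]
          exact hp
  | case3 a b c d e f =>
    rename_i hnf
    have hfeq : f = PySem.Chars.find a w := rfl
    rw [not_not] at hnf
    rw [hfeq] at hnf
    have hni : ¬ w <:+: a := (PySem.Chars.find_eq_neg_one_iff a w).mp hnf
    constructor
    · exact Or.inl
    · rintro (h | ⟨p, hp, h1, h2⟩)
      · exact h
      · exact absurd ((PySem.Chars.isIn_iff_infix w a).mp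
          ((PySem.Chars.exists_prefix_drop_iff_isIn w a).mp ⟨p, hp⟩)) hni

lemma pvFoldA_mem (s : List Char) (fl : List String) :
    ∀ (result : List Int) (j : Int),
    (j ∈ fl.foldl (fun result filtered => pvLoopA filtered.toList s 0 0 result) result ↔
      j ∈ result ∨ pvCovers s fl j) := by
  induction fl with
  | nil => simp [pvCovers]
  | cons w fl ih =>
    intro result j
    simp only [List.foldl_cons, pvCovers, List.exists_mem_cons_iff]
    rw [ih, pvLoopA_mem w.toList s 0 0 result j le_rfl]
    simp only [if_true, zero_add, pvCovers]
    exact or_assoc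

lemma pvInnerB_mem (s : List Char) (i : Int) (fl : List String) :
    ∀ (cov : PySem.Set Int) (j : Int),
    (j ∈ fl.foldl (fun covered word =>
        let w := word.toList
        if PySem.List.slice s (some i) (some (i + w.length)) = w then
          PySem.Set.update covered (PySem.List.pyRange i (i + w.length) 1)
        else covered) cov ↔
    j ∈ cov ∨ ∃ w ∈ fl, PySem.List.slice s (some i) (some (i + w.toList.length)) = w.toList ∧ i ≤ j ∧ j < i + w.toList.length) := by
  induction fl with
  | nil => simp
  | cons w fl ih =>
    intro cov j
    simp only [List.foldl_cons, List.exists_mem_cons_iff]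
    rw [ih]
    by_cases hm : PySem.List.slice s (some i) (some (i + w.toList.length)) = w.toList
    · simp only [hm, if_pos, PySem.Set.mem_update, PySem.List.mem_pyRange_one]
      tauto
    · simp only [hm, if_false]
      tauto

lemma pvOuterB_mem (s : List Char) (fl : List String) (I : List Int) :
    ∀ (cov : PySem.Set Int) (j : Int),
    (j ∈ I.foldl (fun covered i =>
      fl.foldl (fun covered word =>
        let w := word.toList
        if PySem.List.slice s (some i) (some (i + w.length)) = w then
          PySem.Set.update covered (PySem.List.pyRange i (i + w.length) 1)
        else covered) covered) cov ↔
    j ∈ cov ∨ ∃ i ∈ I, ∃ w ∈ fl, PySem.List.slice s (some i) (some (i + w.toList.length)) = w.toList ∧ i ≤ j ∧ j < i + w.toList.length) := by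
  induction I with
  | nil => simp
  | cons i I ih =>
    intro cov j
    simp only [List.foldl_cons, List.exists_mem_cons_iff]
    rw [ih, pvInnerB_mem]
    exact or_assoc

lemma pvSlice_iff (s w : List Char) (p : Nat) :
    PySem.List.slice s (some (p : Int)) (some ((p : Int) + w.length)) = w ↔ w <+: s.drop p := by
  have hc : ((p : Int) + w.length) = ((p + w.length : Nat) : Int) := by push_cast; ring
  rw [hc, PySem.List.slice_natCast]
  have h2 : (p + w.length - p) = w.length := by omega
  rw [h2]
  constructor
  · intro h; exact (List.prefix_iff_eq_take).mpr h.symm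
  · intro h; exact ((List.prefix_iff_eq_take).mp h).symm

lemma pvFoldB_mem (s : List Char) (fl : List String) (j : Int) :
    (j ∈ (PySem.List.pyRange 0 s.length 1).foldl (fun covered i =>
      fl.foldl (fun covered word =>
        let w := word.toList
        if PySem.List.slice s (some i) (some (i + w.length)) = w then
          PySem.Set.update covered (PySem.List.pyRange i (i + w.length) 1)
        else covered) covered) (PySem.Set.ofList [])) ↔ pvCovers s fl j := by
  rw [pvOuterB_mem]
  simp only [PySem.Set.mem_ofList, List.not_mem_nil, false_or, pvCovers]
  constructor
  · rintro ⟨i, hi, w, hw, hsl, h1, h2⟩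
    rw [PySem.List.mem_pyRange_one] at hi
    obtain ⟨p, rfl⟩ : ∃ p : Nat, i = (p : Int) := ⟨i.toNat, (Int.toNat_of_nonneg hi.1).symm⟩
    exact ⟨w, hw, p, (pvSlice_iff s w.toList p).mp hsl, h1, h2⟩
  · rintro ⟨w, hw, p, hpre, h1, h2⟩
    have hw0 : 0 < w.toList.length := by omega
    have hlen : w.toList.length ≤ (s.drop p).length := hpre.length_le
    simp only [List.length_drop] at hlen
    refine ⟨(p : Int), ?_, w, hw, (pvSlice_iff s w.toList p).mpr hpre, h1, h2⟩
    rw [PySem.List.mem_pyRange_one]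
    constructor
    · omega
    · omega

lemma pvFoldB_nodup (s : List Char) (fl : List String) :
    List.Nodup ((PySem.List.pyRange 0 s.length 1).foldl (fun (covered : PySem.Set Int) i =>
      fl.foldl (fun covered word =>
        let w := word.toList
        if PySem.List.slice s (some i) (some (i + w.length)) = w then
          PySem.Set.update covered (PySem.List.pyRange i (i + w.length) 1)
        else covered) covered) (PySem.Set.ofList [])) := by
  have hinner : ∀ (i : Int) (fl' : List String) (cov : PySem.Set Int), cov.Nodup →
      (fl'.foldl (fun covered word =>
        let w := word.toList
        if PySem.List.slice s (some i) (some (i + w.length)) = w then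
          PySem.Set.update covered (PySem.List.pyRange i (i + w.length) 1)
        else covered) cov).Nodup := by
    intro i fl'
    induction fl' with
    | nil => intro cov h; exact h
    | cons w fl' ih =>
      intro cov h
      simp only [List.foldl_cons]
      apply ih
      by_cases hm : PySem.List.slice s (some i) (some (i + w.toList.length)) = w.toList
      · simp only [hm, if_pos]
        exact PySem.Set.nodup_update _ _ h
      · simp only [hm, if_false]
        exact h
  have houter : ∀ (I : List Int) (cov : PySem.Set Int), cov.Nodup →
      (I.foldl (fun (covered : PySem.Set Int) i =>
        fl.foldl (fun covered word =>
          let w := word.toList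
          if PySem.List.slice s (some i) (some (i + w.length)) = w then
            PySem.Set.update covered (PySem.List.pyRange i (i + w.length) 1)
          else covered) covered) cov).Nodup := by
    intro I
    induction I with
    | nil => intro cov h; exact h
    | cons i I ih =>
      intro cov h
      simp only [List.foldl_cons]
      exact ih _ (hinner i fl cov h)
  exact houter _ _ (PySem.Set.nodup_ofList _)

lemma pvSorted_rev_neg (xs : List Int) :
    PySem.List.sorted xs id true = PySem.List.sorted xs (fun x => -x) false := by
  have hb : (fun (a b : Int) => decide (id b < id a)) = (fun (a b : Int) => decide (-a < -b)) := by
    funext a b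
    exact decide_eq_decide.mpr ⟨fun h => by simp only [id] at h; omega, fun h => by simp only [id]; omega⟩
  simp only [PySem.List.sorted, if_true, Bool.false_eq_true, if_false, hb]

lemma pvSorted_rev_congr (xs ys : List Int) (hx : xs.Nodup) (h : xs.Perm ys) :
    PySem.List.sorted xs id true = PySem.List.sorted ys id true := by
  rw [pvSorted_rev_neg xs, pvSorted_rev_neg ys]
  apply PySem.List.sorted_eq_of_perm_of_pairwise_lt
  · exact (PySem.List.sorted_perm ys (fun x => -x) false).trans h.symm
  · have hp := PySem.List.sorted_pairwise ys (fun x => -x)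
    have hnd : (PySem.List.sorted ys (fun x => -x) false).Nodup :=
      ((PySem.List.sorted_perm ys (fun x => -x) false).nodup_iff).mpr (h.nodup_iff.mp hx)
    exact (hp.and hnd).imp (fun {a b} ⟨hle, hne⟩ => by
      have : a ≠ b := hne
      omega)

-- ===== VERDICT (by name: the statement is the Claim_ definition above) =====
theorem is_filtering_list_in_text_spec : Claim_equal_is_filtering_list_in_text := by
  intro t fl _
  unfold Spec_is_filtering_list_in_text is_filtering_list_in_text is_filtering_list_in_text_alt
  apply pvSorted_rev_congr
  · exact PySem.Set.nodup_ofList _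
  · apply List.perm_of_nodup_nodup_toFinset_eq (PySem.Set.nodup_ofList _) (pvFoldB_nodup _ _)
    ext j
    simp only [List.mem_toFinset, PySem.Set.mem_ofList, pvFoldB_mem]
    have := pvFoldA_mem t.toList fl [] j
    simp only [List.not_mem_nil, false_or] at this
    exact this
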